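-- pv_equiv track=rewrite | github.com/ajitrajasekharan/JPTDP_wrapper | POS_wrapper/conv_unicode.py | sbd_handle
-- ===== SOURCE A (Python) =====
-- def sbd_handle(inp_str):
--     arr = inp_str.split()
--     ret_arr = []
--     for i in range(len(arr)):
--         word = arr[i]
--         length = len(word)
--         if (length >  1 and word.endswith('.') and (word[length-2].isalpha() or word[length-2].isdigit())):
--             ret_arr.append(word[:length-1])
--             ret_arr.append('.')
--         else:
--             ret_arr.append(word)
--     return ' '.join(ret_arr)
-- ===== SOURCE B (Python) =====
-- def sbd_handle(inp_str):
--     # Normalise whitespace once, then do a single character-level scan that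
--     # inserts a space before a token-final '.' preceded by an alphanumeric char.
--     text = ' '.join(inp_str.split())
--     out = []
--     i = 0
--     n = len(text)
--     while i < n:
--         c = text[i]
--         if (i + 1 < n and text[i + 1] == '.' and (i + 2 == n or text[i + 2] == ' ')
--                 and (c.isalpha() or c.isdigit())):
--             out.append(c + ' .')
--             i += 2
--         else:
--             out.append(c)
--             i += 1
--     return ''.join(out)
-- ===== Notes on version B (the rewrite author's own statement) =====
-- stated objective: alternative
-- what changed: Replaces the per-token index loop (split, test each word, append one or two tokens, re-join) by a single character-level scan over the whitespace-normalised string that inserts a space before a token-final period preceded by an alphanumeric character.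
import Mathlib
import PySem

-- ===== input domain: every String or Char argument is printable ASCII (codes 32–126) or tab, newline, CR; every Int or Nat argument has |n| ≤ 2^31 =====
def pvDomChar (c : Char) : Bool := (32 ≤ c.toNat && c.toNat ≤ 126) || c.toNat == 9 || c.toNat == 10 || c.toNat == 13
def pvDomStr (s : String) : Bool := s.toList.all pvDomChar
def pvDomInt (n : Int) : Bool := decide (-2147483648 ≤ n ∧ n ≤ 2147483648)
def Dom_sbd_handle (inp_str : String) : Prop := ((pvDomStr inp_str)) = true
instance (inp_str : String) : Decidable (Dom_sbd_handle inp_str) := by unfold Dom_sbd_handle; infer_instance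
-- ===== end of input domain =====

-- B replaces A's per-token loop by a single character-level scan over the
-- whitespace-normalised string (objective: alternative algorithm, same cost).

-- ===== PORT A =====
def sbd_handle (inp_str : String) : String :=
  let arr := PySem.Str.split₀ inp_str
  let ret_arr := (PySem.List.pyRange 0 (PySem.List.len arr)).foldl
    (fun ret_arr i =>
      let word := PySem.List.pyGetD arr i ""
      let length := PySem.Str.len word
      if (decide (length > 1) && PySem.Str.endswith word "." &&
          (PySem.Str.pyGet? word (length - 2)).elim false
            (fun ch => PySem.Chars.isalpha ch || PySem.Chars.isdigit ch)) then
        ret_arr ++ [PySem.Str.slice word none (some (length - 1))] ++ ["."]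
      else
        ret_arr ++ [word]) []
  PySem.Str.join " " ret_arr

-- ===== PORT B =====
-- the while-loop of Source B: advance by 2 emitting "c ." on a match, else by 1
def sbdScanB : List Char → List Char
  | [] => []
  | [c] => [c]
  | c :: d :: rest =>
      if d = '.' ∧ (rest = [] ∨ rest.head? = some ' ') ∧
         (PySem.Chars.isalpha c || PySem.Chars.isdigit c) = true then
        c :: ' ' :: '.' :: sbdScanB rest
      else
        c :: sbdScanB (d :: rest)

def sbd_handle_alt (inp_str : String) : String :=
  let text := PySem.Str.join " " (PySem.Str.split₀ inp_str)
  String.ofList (sbdScanB text.toList)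

-- ===== PRECONDITION & SPEC =====
def Spec_sbd_handle (inp_str : String) (out : String) : Prop := out = sbd_handle_alt inp_str
instance (inp_str : String) (out : String) : Decidable (Spec_sbd_handle inp_str out) := by unfold Spec_sbd_handle; infer_instance

-- ===== CLAIM (what is proved, stated in full; the proofs are below) =====
def Claim_equal_sbd_handle : Prop := ∀ (inp_str : String), Dom_sbd_handle inp_str → Spec_sbd_handle inp_str (sbd_handle inp_str)

-- ===== LEMMAS AND PROOFS =====

-- the per-word condition of A, on char lists
def condF (w : List Char) : Bool :=
  decide ((w.length : Int) > 1) && PySem.Chars.endswith w ['.'] &&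
  (PySem.Chars.pyGet? w ((w.length : Int) - 2)).elim false
    (fun ch => PySem.Chars.isalpha ch || PySem.Chars.isdigit ch)

-- the per-word rewrite both programs perform, on char lists
def fC (w : List Char) : List Char :=
  if condF w then w.dropLast ++ [' ', '.'] else w

-- A's per-word token contribution
def gC (w : List Char) : List (List Char) :=
  if condF w then [w.dropLast, ['.']] else [w]

theorem join_append_of_ne_nil (sep : List Char) (l1 l2 : List (List Char))
    (h1 : l1 ≠ []) (h2 : l2 ≠ []) :
    PySem.Chars.join sep (l1 ++ l2) =
      PySem.Chars.join sep l1 ++ sep ++ PySem.Chars.join sep l2 := by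
  induction l1 with
  | nil => exact absurd rfl h1
  | cons a l1 ih =>
    cases l1 with
    | nil =>
      cases l2 with
      | nil => exact absurd rfl h2
      | cons b l2 =>
        rw [List.singleton_append, PySem.Chars.join_cons_cons sep a b l2,
          PySem.Chars.join_singleton]
    | cons b l1 =>
      have hih := ih (by simp)
      rw [List.cons_append, List.cons_append,
        PySem.Chars.join_cons_cons sep a b (l1 ++ l2),
        ← List.cons_append, hih,
        PySem.Chars.join_cons_cons sep a b l1]
      simp

theorem gC_ne_nil (w : List Char) : gC w ≠ [] := by
  unfold gC; split <;> simp

theorem flatMap_gC_ne_nil (w : List Char) (ws : List (List Char)) :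
    (w :: ws).flatMap gC ≠ [] := by
  simp only [List.flatMap_cons]
  intro h
  exact gC_ne_nil w (by simpa using (List.append_eq_nil_iff.mp h).1)

theorem join_gC (w : List Char) :
    PySem.Chars.join [' '] (gC w) = fC w := by
  unfold gC fC
  split
  · simp [PySem.Chars.join_cons_cons, PySem.Chars.join_singleton]
  · simp [PySem.Chars.join_singleton]

-- A-side normalisation: joining A's token list = joining the per-word rewrite
theorem joinA (ws : List (List Char)) :
    PySem.Chars.join [' '] (ws.flatMap gC) =
      PySem.Chars.join [' '] (ws.map fC) := by
  induction ws with
  | nil => simp [PySem.Chars.join_nil]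
  | cons w ws ih =>
    cases ws with
    | nil => simp [PySem.Chars.join_singleton, join_gC]
    | cons w' ws' =>
      rw [List.flatMap_cons,
        join_append_of_ne_nil [' '] (gC w) ((w' :: ws').flatMap gC)
          (gC_ne_nil w) (flatMap_gC_ne_nil w' ws'),
        join_gC, ih]
      simp only [List.map_cons]
      rw [PySem.Chars.join_cons_cons [' '] (fC w) (fC w') (ws'.map fC)]

-- facts about the tokens produced by Python's str.split()
theorem split₀_go_tokens (s : List Char) :
    ∀ (cur : List Char) (acc : List (List Char)),
      (∀ ch ∈ cur, PySem.Chars.isspace ch = false) →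
      (∀ w ∈ acc, w ≠ [] ∧ ∀ ch ∈ w, PySem.Chars.isspace ch = false) →
      ∀ w ∈ PySem.Chars.split₀.go s cur acc,
        w ≠ [] ∧ ∀ ch ∈ w, PySem.Chars.isspace ch = false := by
  induction s with
  | nil =>
    intro cur acc hcur hacc w hw
    rw [PySem.Chars.split₀.go.eq_def] at hw
    by_cases hc : cur.isEmpty
    · simp [hc] at hw
      exact hacc w hw
    · simp [hc] at hw
      rcases hw with h | h
      · exact hacc w h
      · subst h
        constructor
        · simpa [List.isEmpty_iff] using hc
        · intro ch hch; exact hcur ch (List.mem_reverse.mp hch)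
  | cons c rest ih =>
    intro cur acc hcur hacc w hw
    rw [PySem.Chars.split₀.go.eq_def] at hw
    by_cases hs : PySem.Chars.isspace c
    · by_cases hc : cur.isEmpty
      · simp [hs, hc] at hw
        exact ih [] acc (by simp) hacc w hw
      · simp [hs, hc] at hw
        refine ih [] (cur.reverse :: acc) (by simp) ?_ w hw
        intro v hv
        rcases List.mem_cons.mp hv with h | h
        · subst h
          exact ⟨by simpa [List.isEmpty_iff] using hc,
            fun ch hch => hcur ch (List.mem_reverse.mp hch)⟩
        · exact hacc v h
    · simp [hs] at hw
      refine ih (c :: cur) acc ?_ hacc w hw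
      intro ch hch
      rcases List.mem_cons.mp hch with h | h
      · subst h; simpa using hs
      · exact hcur ch h

theorem split₀_tokens (s : List Char) :
    ∀ w ∈ PySem.Chars.split₀ s,
      w ≠ [] ∧ ∀ ch ∈ w, PySem.Chars.isspace ch = false := by
  intro w hw
  exact split₀_go_tokens s [] [] (by simp) (by simp) w hw

-- Chars.endswith as a decide
theorem endswith_eq_decide (s p : List Char) :
    PySem.Chars.endswith s p = decide (p <:+ s) := by
  by_cases h : p <:+ s
  · simp [h, (PySem.Chars.endswith_iff s p).mpr h]
  · simp only [h, decide_false]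
    exact Bool.eq_false_iff.mpr (fun hh => h ((PySem.Chars.endswith_iff s p).mp hh))

-- condF on a two-element word
theorem condF_pair (c d : Char) :
    condF [c, d] = ((decide (d = '.')) &&
      (PySem.Chars.isalpha c || PySem.Chars.isdigit c)) := by
  have he : PySem.Chars.endswith [c, d] ['.'] = decide (d = '.') := by
    rw [endswith_eq_decide]
    apply decide_eq_decide.mpr
    constructor
    · intro h
      rcases List.suffix_cons_iff.mp h with h | h
      · simp at h
      · rcases List.suffix_cons_iff.mp h with h | h
        · simpa using h.symm
        · simpa using List.suffix_nil.mp h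
    · rintro rfl
      exact List.suffix_cons_iff.mpr (Or.inr (List.suffix_cons_iff.mpr (Or.inl rfl)))
  have hg : PySem.Chars.pyGet? [c, d] (((([c, d] : List Char).length : Int)) - 2)
      = some c := by
    rw [show (((([c, d] : List Char).length : Int)) - 2) = ((0 : Nat) : Int) by simp,
      PySem.Chars.pyGet?_eq_listPyGet?, PySem.List.pyGet?_natCast]
    rfl
  unfold condF
  rw [hg]
  simp only [he]
  simp

-- condF commutes with cons for long tails
theorem condF_cons (c : Char) (w : List Char) (hw : 2 ≤ w.length) :
    condF (c :: w) = condF w := by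
  obtain ⟨d, w', rfl⟩ : ∃ d w', w = d :: w' := by
    cases w with
    | nil => simp at hw
    | cons d w' => exact ⟨d, w', rfl⟩
  have he : PySem.Chars.endswith (c :: d :: w') ['.'] =
      PySem.Chars.endswith (d :: w') ['.'] := by
    rw [endswith_eq_decide, endswith_eq_decide]
    apply decide_eq_decide.mpr
    constructor
    · intro h
      rcases List.suffix_cons_iff.mp h with h | h
      · have := congrArg List.length h
        simp at this
      · exact h
    · intro h
      exact List.suffix_cons_iff.mpr (Or.inr h)
  have hg : PySem.Chars.pyGet? (c :: d :: w') ((((c :: d :: w' : List Char).length : Int)) - 2)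
      = PySem.Chars.pyGet? (d :: w') ((((d :: w' : List Char).length : Int)) - 2) := by
    have h3 : 1 ≤ w'.length := by simpa using hw
    have e1 : (((c :: d :: w' : List Char).length : Int)) - 2 = ((w'.length : Nat) : Int) := by
      simp only [List.length_cons]; omega
    have e2 : (((d :: w' : List Char).length : Int)) - 2 = ((w'.length - 1 : Nat) : Int) := by
      simp only [List.length_cons]; omega
    rw [PySem.Chars.pyGet?_eq_listPyGet?, PySem.Chars.pyGet?_eq_listPyGet?, e1, e2,
      PySem.List.pyGet?_natCast, PySem.List.pyGet?_natCast]
    obtain ⟨k, hk⟩ : ∃ k, w'.length = k + 1 := ⟨w'.length - 1, by omega⟩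
    rw [hk]
    simp
  unfold condF
  rw [he, hg]
  have hl1 : decide (((c :: d :: w' : List Char).length : Int) > 1) = true := by
    simp only [List.length_cons, decide_eq_true_eq]
    push_cast
    omega
  have hl2 : decide (((d :: w' : List Char).length : Int) > 1) = true := by
    have h3 : 1 ≤ w'.length := by simpa using hw
    simp only [List.length_cons, decide_eq_true_eq]
    push_cast
    omega
  rw [hl1, hl2]

theorem fC_single (c : Char) : fC [c] = [c] := by
  unfold fC condF
  simp

theorem fC_pair (c d : Char) :
    fC [c, d] = if (decide (d = '.') &&
        (PySem.Chars.isalpha c || PySem.Chars.isdigit c)) then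
      [c, ' ', '.'] else [c, d] := by
  unfold fC
  rw [condF_pair]
  split <;> simp_all

theorem fC_cons (c : Char) (w : List Char) (hw : 2 ≤ w.length) :
    fC (c :: w) = c :: fC w := by
  unfold fC
  rw [condF_cons c w hw]
  split
  · rw [List.dropLast_cons_of_ne_nil (by intro h; subst h; simp at hw)]
    simp
  · rfl

-- scanning past a space
theorem sbdScanB_space (xs : List Char) :
    sbdScanB (' ' :: xs) = ' ' :: sbdScanB xs := by
  cases xs with
  | nil => rfl
  | cons y ys =>
    rw [sbdScanB]
    have : ¬ ((y = '.') ∧ (ys = [] ∨ ys.head? = some ' ') ∧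
        (PySem.Chars.isalpha ' ' || PySem.Chars.isdigit ' ') = true) := by
      rintro ⟨_, _, h⟩
      exact absurd h (by decide)
    rw [if_neg this]

-- the word lemma: scanning a token followed by a break does the rewrite fC
theorem sbdScanB_word (w : List Char) (t : List Char)
    (hne : w ≠ []) (hns : ∀ ch ∈ w, PySem.Chars.isspace ch = false)
    (ht : t = [] ∨ ∃ t', t = ' ' :: t') :
    sbdScanB (w ++ t) = fC w ++ sbdScanB t := by
  induction w with
  | nil => exact absurd rfl hne
  | cons c w ih =>
    cases w with
    | nil =>
      -- single-character word: no match possible at c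
      rcases ht with rfl | ⟨t', rfl⟩
      · simp [sbdScanB, fC_single]
      · rw [List.cons_append, List.nil_append, sbdScanB, if_neg (by simp), fC_single]
        simp
    | cons d w' =>
      cases w' with
      | nil =>
        -- two-character word: the match condition is exactly condF [c, d]
        have hlook : (t = [] ∨ t.head? = some ' ') := by
          rcases ht with rfl | ⟨t', rfl⟩
          · exact Or.inl rfl
          · exact Or.inr rfl
        rw [show ([c, d] : List Char) ++ t = c :: d :: t by simp]
        cases t with
        | nil =>
          rw [sbdScanB.eq_def]
          rw [fC_pair]
          by_cases hd : d = '.' <;>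
            by_cases ha : (PySem.Chars.isalpha c || PySem.Chars.isdigit c) = true <;>
            simp [hd, ha, sbdScanB]
        | cons u t' =>
          have hu : u = ' ' := by
            rcases ht with h | ⟨t'', h⟩
            · simp at h
            · simpa using congrArg List.head? h
          subst hu
          rw [sbdScanB.eq_def]
          simp only []
          rw [fC_pair]
          by_cases hd : d = '.' <;>
            by_cases ha : (PySem.Chars.isalpha c || PySem.Chars.isdigit c) = true
          · simp [hd, ha]
          · simp [hd, ha, sbdScanB, sbdScanB_space]
          · simp [hd, ha, sbdScanB, sbdScanB_space]
          · simp [hd, ha, sbdScanB, sbdScanB_space]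
      | cons e r =>
        -- word of length ≥ 3: the lookahead at c sees e, which is not a space
        have he : PySem.Chars.isspace e = false := hns e (by simp)
        have hcond : ¬ ((d = '.') ∧ ((e :: r ++ t) = [] ∨ (e :: r ++ t).head? = some ' ') ∧
            (PySem.Chars.isalpha c || PySem.Chars.isdigit c) = true) := by
          rintro ⟨_, h2, _⟩
          rcases h2 with h2 | h2
          · simp at h2
          · have : e = ' ' := by simpa using h2
            subst this
            simp [PySem.Chars.isspace] at he
        rw [show (c :: d :: e :: r) ++ t = c :: d :: (e :: r ++ t) by simp,
          sbdScanB, if_neg hcond]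
        have ihh := ih (by simp) (fun ch hch => hns ch (by simp [hch]))
        rw [show d :: (e :: r ++ t) = (d :: e :: r) ++ t by simp, ihh,
          fC_cons c (d :: e :: r) (by simp)]
        simp

-- the whole-string lemma: scanning the joined tokens = joining rewritten tokens
theorem sbdScanB_join (ws : List (List Char))
    (h : ∀ w ∈ ws, w ≠ [] ∧ ∀ ch ∈ w, PySem.Chars.isspace ch = false) :
    sbdScanB (PySem.Chars.join [' '] ws) =
      PySem.Chars.join [' '] (ws.map fC) := by
  induction ws with
  | nil => simp [PySem.Chars.join_nil, sbdScanB]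
  | cons w ws ih =>
    cases ws with
    | nil =>
      rw [PySem.Chars.join_singleton, List.map_cons, List.map_nil,
        PySem.Chars.join_singleton]
      have := sbdScanB_word w [] (h w (by simp)).1 (h w (by simp)).2 (Or.inl rfl)
      simpa [sbdScanB] using this
    | cons w' ws' =>
      rw [PySem.Chars.join_cons_cons]
      simp only [List.map_cons]
      rw [PySem.Chars.join_cons_cons [' '] (fC w) (fC w') (List.map fC ws')]
      have hstep : w ++ [' '] ++ PySem.Chars.join [' '] (w' :: ws') =
          w ++ (' ' :: PySem.Chars.join [' '] (w' :: ws')) := by simp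
      rw [hstep, sbdScanB_word w (' ' :: PySem.Chars.join [' '] (w' :: ws'))
        (h w (by simp)).1 (h w (by simp)).2 (Or.inr ⟨_, rfl⟩),
        sbdScanB_space, ih (fun v hv => h v (by simp [hv]))]
      simp

-- A's slice word[:len-1] is dropLast when len > 1
theorem slice_dropLast (w : List Char) (h : 1 < w.length) :
    PySem.List.slice w none (some ((w.length : Int) - 1)) = w.dropLast := by
  have h0 : (0 : Int) ≤ (w.length : Int) - 1 := by omega
  rw [PySem.List.slice_to _ h0, List.dropLast_eq_take]
  congr 1
  omega

-- A's per-word token contribution, string level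
def gS (word : String) : List String :=
  if (decide (PySem.Str.len word > 1) && PySem.Str.endswith word "." &&
      (PySem.Str.pyGet? word (PySem.Str.len word - 2)).elim false
        (fun ch => PySem.Chars.isalpha ch || PySem.Chars.isdigit ch)) then
    [PySem.Str.slice word none (some (PySem.Str.len word - 1)), "."]
  else [word]

theorem condS_eq (word : String) :
    (decide (PySem.Str.len word > 1) && PySem.Str.endswith word "." &&
      (PySem.Str.pyGet? word (PySem.Str.len word - 2)).elim false
        (fun ch => PySem.Chars.isalpha ch || PySem.Chars.isdigit ch)) =
      condF word.toList := by
  unfold condF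
  rw [PySem.Str.endswith_eq, PySem.Str.pyGet?_eq, PySem.Str.len_eq]
  rfl

theorem condF_length {w : List Char} (h : condF w = true) : 1 < w.length := by
  unfold condF at h
  rw [Bool.and_eq_true, Bool.and_eq_true] at h
  have := h.1.1
  simp at this
  exact_mod_cast this

theorem branchA (word : String) :
    (gS word).map String.toList = gC word.toList := by
  unfold gS gC
  rw [condS_eq]
  by_cases h : condF word.toList = true
  · rw [if_pos h, if_pos h]
    have hl : 1 < word.toList.length := condF_length h
    have hcast : ((word.length : Int)) = ((word.toList.length : Int)) := by
      rw [String.length_toList]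
    simp [hcast, slice_dropLast word.toList hl]
  · rw [if_neg (by simpa using h), if_neg (by simpa using h)]
    simp

-- A's index loop resolved into flatMap of the per-word contribution
theorem foldA (xs : List String) :
    (PySem.List.pyRange 0 (PySem.List.len xs)).foldl
      (fun ret_arr i =>
        let word := PySem.List.pyGetD xs i ""
        let length := PySem.Str.len word
        if (decide (length > 1) && PySem.Str.endswith word "." &&
            (PySem.Str.pyGet? word (length - 2)).elim false
              (fun ch => PySem.Chars.isalpha ch || PySem.Chars.isdigit ch)) then
          ret_arr ++ [PySem.Str.slice word none (some (length - 1))] ++ ["."]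
        else
          ret_arr ++ [word]) [] = xs.flatMap gS := by
  have h := PySem.List.foldl_pyRange_pyGetD xs ""
    (fun ret_arr word =>
      if (decide (PySem.Str.len word > 1) && PySem.Str.endswith word "." &&
          (PySem.Str.pyGet? word (PySem.Str.len word - 2)).elim false
            (fun ch => PySem.Chars.isalpha ch || PySem.Chars.isdigit ch)) then
        ret_arr ++ [PySem.Str.slice word none (some (PySem.Str.len word - 1))] ++ ["."]
      else
        ret_arr ++ [word]) [] (le_refl 0)
  have h2 : List.foldl
      (fun ret_arr word =>
        if (decide (PySem.Str.len word > 1) && PySem.Str.endswith word "." &&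
            (PySem.Str.pyGet? word (PySem.Str.len word - 2)).elim false
              (fun ch => PySem.Chars.isalpha ch || PySem.Chars.isdigit ch)) then
          ret_arr ++ [PySem.Str.slice word none (some (PySem.Str.len word - 1))] ++ ["."]
        else
          ret_arr ++ [word]) [] (List.drop (0 : Int).toNat xs) = xs.flatMap gS := by
    rw [Int.toNat_zero, List.drop_zero]
    have h3 := PySem.List.foldl_congr_mem xs
      (fun ret_arr word =>
        if (decide (PySem.Str.len word > 1) && PySem.Str.endswith word "." &&
            (PySem.Str.pyGet? word (PySem.Str.len word - 2)).elim false
              (fun ch => PySem.Chars.isalpha ch || PySem.Chars.isdigit ch)) then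
          ret_arr ++ [PySem.Str.slice word none (some (PySem.Str.len word - 1))] ++ ["."]
        else
          ret_arr ++ [word])
      (fun ret_arr word => ret_arr ++ gS word) []
      (by
        intro acc x _
        simp only [gS]
        split
        · simp
        · simp)
    rw [h3, PySem.List.foldl_append_eq_flatMap gS xs [], List.nil_append]
  exact h.trans h2

-- ===== VERDICT (by name: the statement is the Claim_ definition above) =====
theorem sbd_handle_spec : Claim_equal_sbd_handle := by
  intro inp_str _
  unfold Spec_sbd_handle sbd_handle sbd_handle_alt
  show PySem.Str.join " "
      ((PySem.List.pyRange 0 (PySem.List.len (PySem.Str.split₀ inp_str))).foldl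
        (fun ret_arr i =>
          let word := PySem.List.pyGetD (PySem.Str.split₀ inp_str) i ""
          let length := PySem.Str.len word
          if (decide (length > 1) && PySem.Str.endswith word "." &&
              (PySem.Str.pyGet? word (length - 2)).elim false
                (fun ch => PySem.Chars.isalpha ch || PySem.Chars.isdigit ch)) then
            ret_arr ++ [PySem.Str.slice word none (some (length - 1))] ++ ["."]
          else
            ret_arr ++ [word]) []) =
    String.ofList (sbdScanB (PySem.Str.join " " (PySem.Str.split₀ inp_str)).toList)
  rw [foldA (PySem.Str.split₀ inp_str)]
  -- now compare at the character level
  unfold PySem.Str.join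
  apply congrArg String.ofList
  rw [List.map_flatMap]
  calc PySem.Chars.join " ".toList ((PySem.Str.split₀ inp_str).flatMap fun a => (gS a).map String.toList)
      = PySem.Chars.join [' '] (((PySem.Str.split₀ inp_str).map String.toList).flatMap gC) := by
        rw [List.flatMap_map]
        exact congrArg _ (List.flatMap_congr (fun w _ => branchA w))
    _ = PySem.Chars.join [' '] (((PySem.Str.split₀ inp_str).map String.toList).map fC) := joinA _
    _ = sbdScanB (PySem.Chars.join [' '] ((PySem.Str.split₀ inp_str).map String.toList)) := by
        rw [PySem.Str.split₀_map_toList]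
        exact (sbdScanB_join _ (split₀_tokens inp_str.toList)).symm
    _ = sbdScanB (PySem.Str.join " " (PySem.Str.split₀ inp_str)).toList := by
        rw [PySem.Str.toList_join]
        rfl
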